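-- pv_equiv track=rewrite | github.com/eobroets/diverse_projekter | Simula/node_com.py | calc_node_com
-- ===== SOURCE A (Python) =====
-- def calc_node_com(comTab, ranksPerNode):
--
--     ranks = len(comTab)
--     nodes = int(ranks/ranksPerNode)
--
--     nodeCom = []
--     for i in range(nodes):
--         nodeCom.append([0,0,0,0])
--
--     for ranki in range(ranks):
--
--         nodei = int(ranki/ranksPerNode)
--         for rankj in range(ranks):
--             nodej = int(rankj/ranksPerNode)
--
--             if comTab[ranki][rankj] > 0:
--                 if nodej == nodei:
--
--                     nodeCom[nodei][0] += comTab[ranki][rankj]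
--                     nodeCom[nodei][2] += 1
--                 else:
--                     nodeCom[nodei][1] += comTab[ranki][rankj]
--                     nodeCom[nodei][3] += 1
--     return nodeCom
-- ===== SOURCE B (Python) =====
-- def calc_node_com(comTab, ranksPerNode):
--     ranks = len(comTab)
--     nodes = int(ranks / ranksPerNode)
--     nodeCom = [[0, 0, 0, 0] for _ in range(nodes)]
--     for ranki in range(ranks):
--         row = comTab[ranki]
--         node = int(ranki / ranksPerNode)
--         tot_s = tot_c = 0
--         for rankj in range(ranks):
--             v = row[rankj]
--             if v > 0:
--                 tot_s += v
--                 tot_c += 1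
--         if tot_c:
--             intra_s = intra_c = 0
--             for v in row[node * ranksPerNode:(node + 1) * ranksPerNode]:
--                 if v > 0:
--                     intra_s += v
--                     intra_c += 1
--             rec = nodeCom[node]
--             rec[0] += intra_s
--             rec[1] += tot_s - intra_s
--             rec[2] += intra_c
--             rec[3] += tot_c - intra_c
--     return nodeCom
-- ===== Notes on version B (the rewrite author's own statement) =====
-- stated objective: alternative
-- what changed: B aggregates per row: one pass collecting the row's total positive sum/count plus a slice-bounded intra-block pass, derives the inter-node columns by subtraction, and updates the node record once per row, instead of A's flat double loop that classifies every cell by two divisions and updates the table cell by cell.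
import Mathlib
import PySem

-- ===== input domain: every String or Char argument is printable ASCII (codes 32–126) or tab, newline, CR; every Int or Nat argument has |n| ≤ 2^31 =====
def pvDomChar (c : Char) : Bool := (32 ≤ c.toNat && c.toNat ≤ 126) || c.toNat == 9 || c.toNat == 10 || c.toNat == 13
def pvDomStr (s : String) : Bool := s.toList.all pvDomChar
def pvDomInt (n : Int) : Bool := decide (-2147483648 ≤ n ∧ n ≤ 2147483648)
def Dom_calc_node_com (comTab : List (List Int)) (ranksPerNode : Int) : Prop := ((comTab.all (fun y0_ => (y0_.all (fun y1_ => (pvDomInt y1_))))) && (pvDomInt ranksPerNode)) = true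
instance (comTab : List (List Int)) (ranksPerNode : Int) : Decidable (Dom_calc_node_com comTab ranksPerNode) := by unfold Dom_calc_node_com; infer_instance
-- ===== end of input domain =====

-- B replaces A's per-cell double loop (a division and a table update per cell) by a per-row
-- pass: row totals plus an intra-block slice, inter-node values obtained by subtraction and a
-- single table update per row; same results, same exceptions (objective: alternative).

-- ===== PORT A =====
-- Python's int(a/b) truncates toward zero; exact as Int.tdiv on this domain.
def calc_node_com (comTab : List (List Int)) (ranksPerNode : Int) : List (List Int) :=
  let ranks : Int := (comTab.length : Int)
  let nodes : Int := Int.tdiv ranks ranksPerNode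
  let nodeCom : List (List Int) :=
    (PySem.List.pyRange 0 nodes 1).foldl (fun nc _ => nc ++ [[0, 0, 0, 0]]) []
  (PySem.List.pyRange 0 ranks 1).foldl (fun nodeCom ranki =>
    let nodei : Int := Int.tdiv ranki ranksPerNode
    (PySem.List.pyRange 0 ranks 1).foldl (fun nodeCom rankj =>
      let nodej : Int := Int.tdiv rankj ranksPerNode
      let v : Int := PySem.List.pyGetD (PySem.List.pyGetD comTab ranki []) rankj 0
      if 0 < v then
        if nodej == nodei then
          let row := PySem.List.pyGetD nodeCom nodei []
          let row := PySem.List.pySetD row 0 (PySem.List.pyGetD row 0 0 + v)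
          let row := PySem.List.pySetD row 2 (PySem.List.pyGetD row 2 0 + 1)
          PySem.List.pySetD nodeCom nodei row
        else
          let row := PySem.List.pyGetD nodeCom nodei []
          let row := PySem.List.pySetD row 1 (PySem.List.pyGetD row 1 0 + v)
          let row := PySem.List.pySetD row 3 (PySem.List.pyGetD row 3 0 + 1)
          PySem.List.pySetD nodeCom nodei row
      else nodeCom) nodeCom) nodeCom

-- ===== PORT B =====
def calc_node_com_alt (comTab : List (List Int)) (ranksPerNode : Int) : List (List Int) :=
  let ranks : Int := (comTab.length : Int)
  let nodes : Int := Int.tdiv ranks ranksPerNode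
  let nodeCom : List (List Int) := (PySem.List.pyRange 0 nodes 1).map (fun _ => [0, 0, 0, 0])
  (PySem.List.pyRange 0 ranks 1).foldl (fun nodeCom ranki =>
    let row := PySem.List.pyGetD comTab ranki []
    let node : Int := Int.tdiv ranki ranksPerNode
    let tc : Int × Int := (PySem.List.pyRange 0 ranks 1).foldl
      (fun (acc : Int × Int) rankj =>
        let v := PySem.List.pyGetD row rankj 0
        if 0 < v then (acc.1 + v, acc.2 + 1) else acc) (0, 0)
    if tc.2 ≠ 0 then
      let ic : Int × Int := (PySem.List.slice row (some (node * ranksPerNode))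
          (some ((node + 1) * ranksPerNode))).foldl
        (fun (acc : Int × Int) v => if 0 < v then (acc.1 + v, acc.2 + 1) else acc) (0, 0)
      let rec0 := PySem.List.pyGetD nodeCom node []
      let rec1 := PySem.List.pySetD rec0 0 (PySem.List.pyGetD rec0 0 0 + ic.1)
      let rec2 := PySem.List.pySetD rec1 1 (PySem.List.pyGetD rec1 1 0 + (tc.1 - ic.1))
      let rec3 := PySem.List.pySetD rec2 2 (PySem.List.pyGetD rec2 2 0 + ic.2)
      let rec4 := PySem.List.pySetD rec3 3 (PySem.List.pyGetD rec3 3 0 + (tc.2 - ic.2))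
      PySem.List.pySetD nodeCom node rec4
    else nodeCom) nodeCom

-- ===== PRECONDITION & SPEC =====
-- Pre_ excludes exactly the inputs on which Python A raises: ranksPerNode = 0 (ZeroDivisionError),
-- a row shorter than len(comTab) (IndexError on comTab[ranki][rankj]), and a positive entry in a
-- row ranki whose node index int(ranki/ranksPerNode) is not a valid index of nodeCom (IndexError).
def Pre_calc_node_com (comTab : List (List Int)) (ranksPerNode : Int) : Prop :=
  ranksPerNode ≠ 0 ∧
  (∀ row ∈ comTab, comTab.length ≤ row.length) ∧
  (∀ i ∈ List.range comTab.length, ∀ j ∈ List.range comTab.length,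
     0 < (comTab.getD i []).getD j 0 →
     0 ≤ Int.tdiv (i : Int) ranksPerNode ∧
       Int.tdiv (i : Int) ranksPerNode < Int.tdiv (comTab.length : Int) ranksPerNode)
instance (comTab : List (List Int)) (ranksPerNode : Int) : Decidable (Pre_calc_node_com comTab ranksPerNode) := by
  unfold Pre_calc_node_com; infer_instance
def pvWitness_calc_node_com : List (List Int) × Int := ([[1, 0], [0, 2]], 1)
def Spec_calc_node_com (comTab : List (List Int)) (ranksPerNode : Int) (out : List (List Int)) : Prop := out = calc_node_com_alt comTab ranksPerNode
instance (comTab : List (List Int)) (ranksPerNode : Int) (out : List (List Int)) : Decidable (Spec_calc_node_com comTab ranksPerNode out) := by unfold Spec_calc_node_com; infer_instance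

-- ===== CLAIM (what is proved, stated in full; the proofs are below) =====
def Claim_equal_calc_node_com : Prop := ∀ (comTab : List (List Int)) (ranksPerNode : Int), Dom_calc_node_com comTab ranksPerNode → Pre_calc_node_com comTab ranksPerNode → Spec_calc_node_com comTab ranksPerNode (calc_node_com comTab ranksPerNode)

-- ===== LEMMAS AND PROOFS =====

-- Positive-part sum and count of a list of integers.
def psum (l : List Int) : Int := (l.filter (fun v => decide (0 < v))).sum
def pcnt (l : List Int) : Int := ((l.filter (fun v => decide (0 < v))).length : Int)

-- The body of A's inner loop, as a standalone function.
def stepA (c : List (List Int)) (r : Int) (nc : List (List Int)) (i j : Int) : List (List Int) :=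
  let nodei : Int := Int.tdiv i r
  let nodej : Int := Int.tdiv j r
  let v : Int := PySem.List.pyGetD (PySem.List.pyGetD c i []) j 0
  if 0 < v then
    if nodej == nodei then
      let row := PySem.List.pyGetD nc nodei []
      let row := PySem.List.pySetD row 0 (PySem.List.pyGetD row 0 0 + v)
      let row := PySem.List.pySetD row 2 (PySem.List.pyGetD row 2 0 + 1)
      PySem.List.pySetD nc nodei row
    else
      let row := PySem.List.pyGetD nc nodei []
      let row := PySem.List.pySetD row 1 (PySem.List.pyGetD row 1 0 + v)
      let row := PySem.List.pySetD row 3 (PySem.List.pyGetD row 3 0 + 1)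
      PySem.List.pySetD nc nodei row
  else nc

-- A's inner-loop action on a single table row.
def rowAct (c : List (List Int)) (r : Int) (i j : Int) (row : List Int) : List Int :=
  let v : Int := PySem.List.pyGetD (PySem.List.pyGetD c i []) j 0
  if 0 < v then
    if Int.tdiv j r == Int.tdiv i r then
      PySem.List.pySetD (PySem.List.pySetD row 0 (PySem.List.pyGetD row 0 0 + v)) 2
        (PySem.List.pyGetD (PySem.List.pySetD row 0 (PySem.List.pyGetD row 0 0 + v)) 2 0 + 1)
    else
      PySem.List.pySetD (PySem.List.pySetD row 1 (PySem.List.pyGetD row 1 0 + v)) 3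
        (PySem.List.pyGetD (PySem.List.pySetD row 1 (PySem.List.pyGetD row 1 0 + v)) 3 0 + 1)
  else row

-- The body of B's per-row loop, as a standalone function.
def stepB (c : List (List Int)) (r : Int) (nc : List (List Int)) (i : Int) : List (List Int) :=
  let row := PySem.List.pyGetD c i []
  let node : Int := Int.tdiv i r
  let tc : Int × Int := (PySem.List.pyRange 0 (c.length : Int) 1).foldl
    (fun (acc : Int × Int) j =>
      let v := PySem.List.pyGetD row j 0
      if 0 < v then (acc.1 + v, acc.2 + 1) else acc) (0, 0)
  if tc.2 ≠ 0 then
    let ic : Int × Int := (PySem.List.slice row (some (node * r)) (some ((node + 1) * r))).foldl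
      (fun (acc : Int × Int) v => if 0 < v then (acc.1 + v, acc.2 + 1) else acc) (0, 0)
    let rec0 := PySem.List.pyGetD nc node []
    let rec1 := PySem.List.pySetD rec0 0 (PySem.List.pyGetD rec0 0 0 + ic.1)
    let rec2 := PySem.List.pySetD rec1 1 (PySem.List.pyGetD rec1 1 0 + (tc.1 - ic.1))
    let rec3 := PySem.List.pySetD rec2 2 (PySem.List.pyGetD rec2 2 0 + ic.2)
    let rec4 := PySem.List.pySetD rec3 3 (PySem.List.pyGetD rec3 3 0 + (tc.2 - ic.2))
    PySem.List.pySetD nc node rec4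
  else nc

-- B's per-row action on a single table record.
def recActB (c : List (List Int)) (r : Int) (i : Int) (rec : List Int) : List Int :=
  let row := PySem.List.pyGetD c i []
  let node : Int := Int.tdiv i r
  let tc : Int × Int := (PySem.List.pyRange 0 (c.length : Int) 1).foldl
    (fun (acc : Int × Int) j =>
      let v := PySem.List.pyGetD row j 0
      if 0 < v then (acc.1 + v, acc.2 + 1) else acc) (0, 0)
  if tc.2 ≠ 0 then
    let ic : Int × Int := (PySem.List.slice row (some (node * r)) (some ((node + 1) * r))).foldl
      (fun (acc : Int × Int) v => if 0 < v then (acc.1 + v, acc.2 + 1) else acc) (0, 0)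
    let rec1 := PySem.List.pySetD rec 0 (PySem.List.pyGetD rec 0 0 + ic.1)
    let rec2 := PySem.List.pySetD rec1 1 (PySem.List.pyGetD rec1 1 0 + (tc.1 - ic.1))
    let rec3 := PySem.List.pySetD rec2 2 (PySem.List.pyGetD rec2 2 0 + ic.2)
    PySem.List.pySetD rec3 3 (PySem.List.pyGetD rec3 3 0 + (tc.2 - ic.2))
  else rec

theorem calc_node_com_eq (c : List (List Int)) (r : Int) :
    calc_node_com c r =
      (PySem.List.pyRange 0 (c.length : Int) 1).foldl (fun nc i =>
        (PySem.List.pyRange 0 (c.length : Int) 1).foldl (fun nc j => stepA c r nc i j) nc)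
        ((PySem.List.pyRange 0 (Int.tdiv (c.length : Int) r) 1).foldl
          (fun nc _ => nc ++ [[0, 0, 0, 0]]) []) := rfl

theorem calc_node_com_alt_eq (c : List (List Int)) (r : Int) :
    calc_node_com_alt c r =
      (PySem.List.pyRange 0 (c.length : Int) 1).foldl (fun nc i => stepB c r nc i)
        ((PySem.List.pyRange 0 (Int.tdiv (c.length : Int) r) 1).map (fun _ => [0, 0, 0, 0])) := rfl

theorem foldl_fixed {α β : Type} (l : List α) (f : β → α → β) (b : β)
    (h : ∀ x, f b x = b) : l.foldl f b = b := by
  induction l with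
  | nil => rfl
  | cons x xs ih => simp [List.foldl_cons, h x, ih]

theorem modify_pointwise_id {α : Type} (l : List α) (n : Nat) (f : α → α)
    (h : ∀ x, f x = x) : l.modify n f = l := by
  apply List.ext_getElem?
  intro m
  simp [List.getElem?_modify, h]


theorem set_getD_eq_modify {α : Type} (l : List α) (k : Nat) (d : α) (f : α → α) :
    l.set k (f (l.getD k d)) = l.modify k f := by
  apply List.ext_getElem?
  intro m
  rw [List.getElem?_set, List.getElem?_modify]
  by_cases h : k = m
  · subst h
    by_cases hk : k < l.length
    · rw [List.getD_eq_getElem?_getD]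
      simp only [List.getElem?_eq_getElem hk]
      simp [hk]
    · rw [List.getElem?_eq_none (by omega)]
      simp [hk]
  · simp [h]

theorem modify_modify_same' {α : Type} (l : List α) (n : Nat) (f g : α → α) :
    (l.modify n f).modify n g = l.modify n (fun x => g (f x)) := by
  apply List.ext_getElem?
  intro m
  simp only [List.getElem?_modify]
  cases h : l[m]? <;> by_cases hn : n = m <;> simp [hn]

theorem stepA_eq_modify (c : List (List Int)) (r : Int) (nc : List (List Int)) (i j : Int)
    (hi : 0 ≤ Int.tdiv i r) :
    stepA c r nc i j = nc.modify (Int.tdiv i r).toNat (rowAct c r i j) := by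
  by_cases hv : 0 < PySem.List.pyGetD (PySem.List.pyGetD c i []) j 0
  · rw [← set_getD_eq_modify nc (Int.tdiv i r).toNat [] (rowAct c r i j)]
    simp only [stepA, rowAct, hv, if_true]
    rw [PySem.List.pySetD_of_nonneg nc _ hi, PySem.List.pySetD_of_nonneg nc _ hi,
        PySem.List.pyGetD_of_nonneg nc [] hi]
    by_cases hc : (Int.tdiv j r == Int.tdiv i r) = true
    · simp only [hc, if_true]
    · simp only [hc, Bool.false_eq_true, if_false]
  · have hrow : rowAct c r i j = fun row => row := by
      funext row
      simp [rowAct, hv]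
    rw [hrow, modify_pointwise_id nc _ _ (fun x => rfl)]
    simp [stepA, hv]

theorem inner_fold_modify {α : Type} (js : List α) (k : Nat)
    (g : α → List Int → List Int) (nc : List (List Int)) :
    js.foldl (fun nc j => nc.modify k (g j)) nc =
      nc.modify k (fun row => js.foldl (fun row j => g j row) row) := by
  induction js generalizing nc with
  | nil => exact (modify_pointwise_id nc k _ (fun x => rfl)).symm
  | cons j js ih =>
    rw [List.foldl_cons, ih, modify_modify_same']
    rfl

theorem outer_fold_getElem?_proof {α : Type} (is : List α) (f : α → Nat)
    (G : α → List Int → List Int) (nc : List (List Int)) (n : Nat) :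
    (is.foldl (fun nc i => nc.modify (f i) (G i)) nc)[n]? =
      (fun row => (is.filter (fun i => f i == n)).foldl (fun row i => G i row) row) <$> nc[n]? := by
  induction is generalizing nc with
  | nil => cases h : nc[n]? <;> simp [h]
  | cons i is ih =>
    rw [List.foldl_cons, ih, List.getElem?_modify]
    cases h : nc[n]? with
    | none => simp
    | some row =>
      by_cases hf : f i = n
      · simp [hf, List.filter_cons]
      · have : (f i == n) = false := by simp [hf]
        simp [hf, List.filter_cons, this]

theorem tdiv_nonneg_eq_ediv (a b : Int) (h : 0 ≤ a) : Int.tdiv a b = a / b := by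
  rw [Int.tdiv_eq_ediv]
  simp [h]

theorem nodes_nonpos_of_r_nonpos (R r : Int) (hR : 0 ≤ R) (hr : r ≤ 0) :
    Int.tdiv R r ≤ 0 := by
  rcases lt_or_eq_of_le hr with h | h
  · have h2 := Int.tdiv_nonneg hR (by omega : (0:Int) ≤ -r)
    have h3 : Int.tdiv R r = -(Int.tdiv R (-r)) := by
      rw [show r = -(-r) by ring, Int.tdiv_neg]
      ring_nf
    omega
  · subst h; simp

theorem filter_pyRange_block (R r m : Int) (hr : 0 < r) (hm : 0 ≤ m)
    (hub : (m + 1) * r ≤ R) :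
    (PySem.List.pyRange 0 R 1).filter (fun x => Int.tdiv x r == m) =
      PySem.List.pyRange (m * r) ((m + 1) * r) 1 := by
  have h0 : (0:Int) ≤ m * r := mul_nonneg hm hr.le
  have h1 : m * r ≤ (m + 1) * r := by nlinarith
  rw [PySem.List.pyRange_one_append 0 (m * r) R h0 (le_trans h1 hub),
      PySem.List.pyRange_one_append (m * r) ((m + 1) * r) R h1 hub,
      List.filter_append, List.filter_append]
  have hpre : (PySem.List.pyRange 0 (m * r) 1).filter (fun x => Int.tdiv x r == m) = [] := by
    rw [List.filter_eq_nil_iff]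
    intro x hx
    rw [PySem.List.mem_pyRange_one] at hx
    have : Int.tdiv x r = x / r := tdiv_nonneg_eq_ediv x r hx.1
    have : x / r < m := by rw [Int.ediv_lt_iff_lt_mul hr]; exact hx.2
    simp only [beq_iff_eq]
    omega
  have hblk : (PySem.List.pyRange (m * r) ((m + 1) * r) 1).filter (fun x => Int.tdiv x r == m) =
      PySem.List.pyRange (m * r) ((m + 1) * r) 1 := by
    rw [List.filter_eq_self]
    intro x hx
    rw [PySem.List.mem_pyRange_one] at hx
    have hx0 : 0 ≤ x := le_trans h0 hx.1
    have he : Int.tdiv x r = x / r := tdiv_nonneg_eq_ediv x r hx0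
    have hge : m ≤ x / r := by rw [Int.le_ediv_iff_mul_le hr]; exact hx.1
    have hlt : x / r < m + 1 := by rw [Int.ediv_lt_iff_lt_mul hr]; exact hx.2
    simp only [beq_iff_eq]
    omega
  have hsuf : (PySem.List.pyRange ((m + 1) * r) R 1).filter (fun x => Int.tdiv x r == m) = [] := by
    rw [List.filter_eq_nil_iff]
    intro x hx
    rw [PySem.List.mem_pyRange_one] at hx
    have hx0 : 0 ≤ x := le_trans (le_trans h0 h1) hx.1
    have he : Int.tdiv x r = x / r := tdiv_nonneg_eq_ediv x r hx0
    have hge : m + 1 ≤ x / r := by rw [Int.le_ediv_iff_mul_le hr]; exact hx.1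
    simp only [beq_iff_eq]
    omega
  rw [hpre, hblk, hsuf, List.nil_append, List.append_nil]

theorem psum_cons (v : Int) (l : List Int) :
    psum (v :: l) = (if 0 < v then v else 0) + psum l := by
  simp only [psum, List.filter_cons]
  by_cases h : 0 < v <;> simp [h]

theorem pcnt_cons (v : Int) (l : List Int) :
    pcnt (v :: l) = (if 0 < v then 1 else 0) + pcnt l := by
  simp only [pcnt, List.filter_cons]
  by_cases h : 0 < v
  · simp [h]
    omega
  · simp [h]

theorem psum_filter_not {α : Type} (js : List α) (q : α → Bool) (f : α → Int) :
    psum ((js.filter (fun x => !q x)).map f) =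
      psum (js.map f) - psum ((js.filter q).map f) := by
  induction js with
  | nil => simp [psum]
  | cons x xs ih =>
    cases h : q x <;> simp [List.filter_cons, h, psum_cons, ih] <;> ring

theorem pcnt_filter_not {α : Type} (js : List α) (q : α → Bool) (f : α → Int) :
    pcnt ((js.filter (fun x => !q x)).map f) =
      pcnt (js.map f) - pcnt ((js.filter q).map f) := by
  induction js with
  | nil => simp [pcnt]
  | cons x xs ih =>
    cases h : q x <;> simp [List.filter_cons, h, pcnt_cons, ih] <;> ring

theorem map_getD_range (xs : List Int) (m : Nat) :
    (List.range m).map (fun k => xs.getD k 0) = xs.take m ++ List.replicate (m - xs.length) 0 := by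
  induction m with
  | zero => simp
  | succ m ih =>
    rw [List.range_succ, List.map_append, ih, List.map_singleton]
    by_cases h : m < xs.length
    · have hx : xs.take (m + 1) = xs.take m ++ [xs[m]] := by
        rw [List.take_add_one, List.getElem?_eq_getElem h]
        rfl
      rw [List.getD_eq_getElem?_getD]
      simp only [List.getElem?_eq_getElem h]
      have h1 : m + 1 - xs.length = 0 := by omega
      have h2 : m - xs.length = 0 := by omega
      rw [h1, h2, hx]
      simp
    · rw [List.getD_eq_getElem?_getD, List.getElem?_eq_none (by omega)]
      have h1 : m + 1 - xs.length = (m - xs.length) + 1 := by omega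
      rw [h1, List.replicate_succ']
      have h2 : xs.take (m+1) = xs.take m := by
        rw [List.take_of_length_le (by omega), List.take_of_length_le (by omega)]
      simp [h2]

theorem filter_pos_map_getD (xs : List Int) (m : Nat) :
    ((List.range m).map (fun k => xs.getD k 0)).filter (fun v => decide (0 < v)) =
      (xs.take m).filter (fun v => decide (0 < v)) := by
  rw [map_getD_range, List.filter_append, List.filter_replicate]
  simp

theorem map_pyGetD_range' {α : Type} (xs : List α) (d : α) (a b : Int)
    (h0 : 0 ≤ a) (hab : a ≤ b) :
    (PySem.List.pyRange a b 1).map (fun i => PySem.List.pyGetD xs i d) =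
      (List.range (b.toNat - a.toNat)).map (fun k => xs.getD (a.toNat + k) d) := by
  rw [PySem.List.pyRange_one, List.map_map]
  have hl : (b - a).toNat = b.toNat - a.toNat := by omega
  rw [hl]
  apply List.map_congr_left
  intro k _
  simp only [Function.comp]
  have : a + (k : Int) = ((a.toNat + k : Nat) : Int) := by omega
  rw [this, PySem.List.pyGetD_natCast]

theorem vals_block_filter (row : List Int) (a b : Int) (h0 : 0 ≤ a) (hab : a ≤ b) :
    ((PySem.List.pyRange a b 1).map (fun j => PySem.List.pyGetD row j 0)).filter
        (fun v => decide (0 < v)) =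
      ((row.drop a.toNat).take (b.toNat - a.toNat)).filter (fun v => decide (0 < v)) := by
  rw [map_pyGetD_range' row 0 a b h0 hab]
  have : ∀ k, row.getD (a.toNat + k) 0 = (row.drop a.toNat).getD k 0 := by
    intro k
    rw [List.getD_eq_getElem?_getD, List.getD_eq_getElem?_getD, List.getElem?_drop]
  simp only [this]
  exact filter_pos_map_getD (row.drop a.toNat) (b.toNat - a.toNat)

theorem psum_eq_of_filter_eq (l l' : List Int)
    (h : l.filter (fun v => decide (0 < v)) = l'.filter (fun v => decide (0 < v))) :
    psum l = psum l' := by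
  simp [psum, h]

theorem pcnt_eq_of_filter_eq (l l' : List Int)
    (h : l.filter (fun v => decide (0 < v)) = l'.filter (fun v => decide (0 < v))) :
    pcnt l = pcnt l' := by
  simp [pcnt, h]

theorem qget0 (a b d e z : Int) : PySem.List.pyGetD [a, b, d, e] 0 z = a := by simp [pysem]
theorem qget1 (a b d e z : Int) : PySem.List.pyGetD [a, b, d, e] 1 z = b := by simp [pysem]
theorem qget2 (a b d e z : Int) : PySem.List.pyGetD [a, b, d, e] 2 z = d := by simp [pysem]
theorem qget3 (a b d e z : Int) : PySem.List.pyGetD [a, b, d, e] 3 z = e := by simp [pysem]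
theorem qset0 (a b d e x : Int) : PySem.List.pySetD [a, b, d, e] 0 x = [x, b, d, e] := by simp [pysem]
theorem qset1 (a b d e x : Int) : PySem.List.pySetD [a, b, d, e] 1 x = [a, x, d, e] := by simp [pysem]
theorem qset2 (a b d e x : Int) : PySem.List.pySetD [a, b, d, e] 2 x = [a, b, x, e] := by simp [pysem]
theorem qset3 (a b d e x : Int) : PySem.List.pySetD [a, b, d, e] 3 x = [a, b, d, x] := by simp [pysem]

theorem rowAct_fold (c : List (List Int)) (r i : Int) (js : List Int) :
    ∀ a b d e : Int,
    js.foldl (fun row j => rowAct c r i j row) [a, b, d, e] =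
      [a + psum ((js.filter (fun j => Int.tdiv j r == Int.tdiv i r)).map
            (fun j => PySem.List.pyGetD (PySem.List.pyGetD c i []) j 0)),
       b + psum ((js.filter (fun j => !(Int.tdiv j r == Int.tdiv i r))).map
            (fun j => PySem.List.pyGetD (PySem.List.pyGetD c i []) j 0)),
       d + pcnt ((js.filter (fun j => Int.tdiv j r == Int.tdiv i r)).map
            (fun j => PySem.List.pyGetD (PySem.List.pyGetD c i []) j 0)),
       e + pcnt ((js.filter (fun j => !(Int.tdiv j r == Int.tdiv i r))).map
            (fun j => PySem.List.pyGetD (PySem.List.pyGetD c i []) j 0))] := by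
  induction js with
  | nil =>
    intro a b d e
    simp [psum, pcnt]
  | cons j js ih =>
    intro a b d e
    rw [List.foldl_cons]
    by_cases hv : 0 < PySem.List.pyGetD (PySem.List.pyGetD c i []) j 0
    · by_cases hc : (Int.tdiv j r == Int.tdiv i r) = true
      · have hstep : rowAct c r i j [a, b, d, e] =
            [a + PySem.List.pyGetD (PySem.List.pyGetD c i []) j 0, b, d + 1, e] := by
          simp only [rowAct, hv, hc, if_true, qget0, qset0, qget2, qset2]
        rw [hstep, ih]
        simp only [List.filter_cons, hc, Bool.not_true, Bool.false_eq_true, if_false, if_true,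
          List.map_cons, psum_cons, pcnt_cons, hv]
        simp [add_assoc, add_comm, add_left_comm]
      · have hstep : rowAct c r i j [a, b, d, e] =
            [a, b + PySem.List.pyGetD (PySem.List.pyGetD c i []) j 0, d, e + 1] := by
          simp only [rowAct, hv, hc, Bool.false_eq_true, if_true, if_false,
            qget1, qset1, qget3, qset3]
        rw [hstep, ih]
        simp only [List.filter_cons, hc, Bool.not_false, Bool.false_eq_true, if_false, if_true,
          Bool.not_eq_true', Bool.not_eq_false]
        have hc' : (Int.tdiv j r == Int.tdiv i r) = false := by
          simpa using hc
        simp only [hc', Bool.not_false, if_true, Bool.false_eq_true, if_false,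
          List.map_cons, psum_cons, pcnt_cons, hv]
        simp [add_assoc, add_comm, add_left_comm]
    · have hstep : rowAct c r i j [a, b, d, e] = [a, b, d, e] := by
        simp [rowAct, hv]
      rw [hstep, ih]
      by_cases hc : (Int.tdiv j r == Int.tdiv i r) = true
      · simp only [List.filter_cons, hc, Bool.not_true, Bool.false_eq_true, if_false, if_true,
          List.map_cons, psum_cons, pcnt_cons, hv]
        simp
      · have hc' : (Int.tdiv j r == Int.tdiv i r) = false := by simpa using hc
        simp only [List.filter_cons, hc', Bool.not_false, Bool.false_eq_true, if_false, if_true,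
          List.map_cons, psum_cons, pcnt_cons, hv]
        simp

theorem stepA_nil (c : List (List Int)) (r i j : Int) : stepA c r [] i j = [] := by
  unfold stepA
  by_cases hv : 0 < PySem.List.pyGetD (PySem.List.pyGetD c i []) j 0
  · by_cases hc : (Int.tdiv j r == Int.tdiv i r) = true <;>
      simp only [hv, hc, if_true, if_false, Bool.false_eq_true] <;>
      exact List.eq_nil_of_length_eq_zero (by simp [PySem.List.length_pySetD])
  · simp [hv]


theorem foldPair_pos (vs : List Int) : ∀ a b : Int,
    vs.foldl (fun (acc : Int × Int) v =>
        if 0 < v then (acc.1 + v, acc.2 + 1) else acc) (a, b) =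
      (a + psum vs, b + pcnt vs) := by
  induction vs with
  | nil => intro a b; simp [psum, pcnt]
  | cons v vs ih =>
    intro a b
    rw [List.foldl_cons]
    by_cases hv : 0 < v <;> simp only [hv, if_true, if_false] <;> rw [ih] <;>
      simp [psum_cons, pcnt_cons, hv, add_assoc]

theorem filter_pos_nil_of_sublist (l L : List Int) (h : l.Sublist L)
    (hL : pcnt L = 0) : l.filter (fun v => decide (0 < v)) = [] := by
  have hfL : L.filter (fun v => decide (0 < v)) = [] := by
    apply List.eq_nil_of_length_eq_zero
    simp only [pcnt] at hL
    omega
  have hsub := h.filter (fun v => decide (0 < v))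
  rw [hfL] at hsub
  exact List.sublist_nil.mp hsub

theorem psum_zero_of_sublist (l L : List Int) (h : l.Sublist L) (hL : pcnt L = 0) :
    psum l = 0 := by
  rw [psum, filter_pos_nil_of_sublist l L h hL]
  rfl

theorem pcnt_zero_of_sublist (l L : List Int) (h : l.Sublist L) (hL : pcnt L = 0) :
    pcnt l = 0 := by
  rw [pcnt, filter_pos_nil_of_sublist l L h hL]
  rfl

theorem foldPairIdx_pos (f : Int → Int) (js : List Int) : ∀ a b : Int,
    js.foldl (fun (acc : Int × Int) j =>
        if 0 < f j then (acc.1 + f j, acc.2 + 1) else acc) (a, b) =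
      (a + psum (js.map f), b + pcnt (js.map f)) := by
  induction js with
  | nil => intro a b; simp [psum, pcnt]
  | cons j js ih =>
    intro a b
    rw [List.foldl_cons]
    by_cases hv : 0 < f j <;> simp only [hv, if_true, if_false] <;> rw [ih] <;>
      simp [psum_cons, pcnt_cons, hv, add_assoc]

theorem recActB_quad (c : List (List Int)) (r i : Int) (a b d e : Int) :
    recActB c r i [a, b, d, e] =
      [a + (if pcnt ((PySem.List.pyRange 0 (c.length : Int) 1).map
              (fun j => PySem.List.pyGetD (PySem.List.pyGetD c i []) j 0)) ≠ 0 then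
            psum (PySem.List.slice (PySem.List.pyGetD c i [])
              (some (Int.tdiv i r * r)) (some ((Int.tdiv i r + 1) * r))) else 0),
       b + (if pcnt ((PySem.List.pyRange 0 (c.length : Int) 1).map
              (fun j => PySem.List.pyGetD (PySem.List.pyGetD c i []) j 0)) ≠ 0 then
            psum ((PySem.List.pyRange 0 (c.length : Int) 1).map
              (fun j => PySem.List.pyGetD (PySem.List.pyGetD c i []) j 0)) -
            psum (PySem.List.slice (PySem.List.pyGetD c i [])
              (some (Int.tdiv i r * r)) (some ((Int.tdiv i r + 1) * r))) else 0),
       d + (if pcnt ((PySem.List.pyRange 0 (c.length : Int) 1).map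
              (fun j => PySem.List.pyGetD (PySem.List.pyGetD c i []) j 0)) ≠ 0 then
            pcnt (PySem.List.slice (PySem.List.pyGetD c i [])
              (some (Int.tdiv i r * r)) (some ((Int.tdiv i r + 1) * r))) else 0),
       e + (if pcnt ((PySem.List.pyRange 0 (c.length : Int) 1).map
              (fun j => PySem.List.pyGetD (PySem.List.pyGetD c i []) j 0)) ≠ 0 then
            pcnt ((PySem.List.pyRange 0 (c.length : Int) 1).map
              (fun j => PySem.List.pyGetD (PySem.List.pyGetD c i []) j 0)) -
            pcnt (PySem.List.slice (PySem.List.pyGetD c i [])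
              (some (Int.tdiv i r * r)) (some ((Int.tdiv i r + 1) * r))) else 0)] := by
  have htc : (PySem.List.pyRange 0 (c.length : Int) 1).foldl
      (fun (acc : Int × Int) j =>
        if 0 < PySem.List.pyGetD (PySem.List.pyGetD c i []) j 0 then
          (acc.1 + PySem.List.pyGetD (PySem.List.pyGetD c i []) j 0, acc.2 + 1) else acc)
      (0, 0) =
      (psum ((PySem.List.pyRange 0 (c.length : Int) 1).map
          (fun j => PySem.List.pyGetD (PySem.List.pyGetD c i []) j 0)),
       pcnt ((PySem.List.pyRange 0 (c.length : Int) 1).map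
          (fun j => PySem.List.pyGetD (PySem.List.pyGetD c i []) j 0))) := by
    rw [foldPairIdx_pos (fun j => PySem.List.pyGetD (PySem.List.pyGetD c i []) j 0)]
    simp
  simp only [recActB, htc, foldPair_pos, zero_add, qget0, qset0, qget1, qset1, qget2, qset2,
    qget3, qset3]
  split_ifs with h2 <;> simp


theorem foldl_quad_congr {α : Type} (l : List α) (F G : List Int → α → List Int)
    (h : ∀ (a b d e : Int), ∀ x ∈ l, ∃ a' b' d' e',
      F [a, b, d, e] x = [a', b', d', e'] ∧ G [a, b, d, e] x = [a', b', d', e']) :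
    ∀ a b d e : Int, l.foldl F [a, b, d, e] = l.foldl G [a, b, d, e] := by
  induction l with
  | nil => intro a b d e; rfl
  | cons x xs ih =>
    intro a b d e
    obtain ⟨a', b', d', e', hF, hG⟩ := h a b d e x List.mem_cons_self
    rw [List.foldl_cons, List.foldl_cons, hF, hG]
    exact ih (fun a b d e y hy => h a b d e y (List.mem_cons_of_mem x hy)) a' b' d' e'

theorem block_eq (c : List (List Int)) (r : Int) (hr : 0 < r) (n : Nat)
    (hub : ((n : Int) + 1) * r ≤ (c.length : Int)) :
    ((PySem.List.pyRange 0 (c.length : Int) 1).filter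
        (fun i => (Int.tdiv i r).toNat == n)).foldl
      (fun row i => (PySem.List.pyRange 0 (c.length : Int) 1).foldl
        (fun row j => rowAct c r i j row) row) [0, 0, 0, 0]
    = ((PySem.List.pyRange 0 (c.length : Int) 1).filter
        (fun i => (Int.tdiv i r).toNat == n)).foldl
      (fun rec i => recActB c r i rec) [0, 0, 0, 0] := by
  have hn0 : (0:Int) ≤ (n:Int) := by positivity
  have h0 : (0:Int) ≤ (n:Int) * r := mul_nonneg hn0 hr.le
  have h1 : (n:Int) * r ≤ ((n:Int) + 1) * r := by nlinarith
  have hfiltc : ((PySem.List.pyRange 0 (c.length : Int) 1).filter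
        (fun i => (Int.tdiv i r).toNat == n))
      = ((PySem.List.pyRange 0 (c.length : Int) 1).filter
        (fun i => Int.tdiv i r == (n:Int))) := by
    apply List.filter_congr
    intro x hx
    have hx0 : 0 ≤ x := ((PySem.List.mem_pyRange_one).1 hx).1
    have ht : 0 ≤ Int.tdiv x r := by
      rw [tdiv_nonneg_eq_ediv x r hx0]
      exact Int.ediv_nonneg hx0 hr.le
    by_cases h : Int.tdiv x r = (n:Int)
    · simp [h]
    · have h2 : (Int.tdiv x r).toNat ≠ n := by omega
      simp [h, h2]
  rw [hfiltc, filter_pyRange_block _ r (n:Int) hr hn0 hub]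
  have hti : ∀ i ∈ PySem.List.pyRange ((n:Int) * r) (((n:Int) + 1) * r) 1,
      Int.tdiv i r = (n:Int) := by
    intro i hi
    rw [PySem.List.mem_pyRange_one] at hi
    have hi0 : 0 ≤ i := le_trans h0 hi.1
    rw [tdiv_nonneg_eq_ediv i r hi0]
    have hge : (n:Int) ≤ i / r := (Int.le_ediv_iff_mul_le hr).2 hi.1
    have hlt : i / r < (n:Int) + 1 := (Int.ediv_lt_iff_lt_mul hr).2 hi.2
    omega
  apply foldl_quad_congr
  intro a b d e i hi
  refine ⟨_, _, _, _,
    rowAct_fold c r i (PySem.List.pyRange 0 (c.length : Int) 1) a b d e, ?_⟩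
  rw [recActB_quad]
  have hslice : PySem.List.slice (PySem.List.pyGetD c i [])
        (some (Int.tdiv i r * r)) (some ((Int.tdiv i r + 1) * r))
      = ((PySem.List.pyGetD c i []).drop ((n:Int) * r).toNat).take
          ((((n:Int) + 1) * r).toNat - ((n:Int) * r).toNat) := by
    rw [hti i hi, PySem.List.slice_toNat _ h0 (le_trans h0 h1)]
  have hvin : (((PySem.List.pyRange 0 (c.length : Int) 1).filter
        (fun j => Int.tdiv j r == Int.tdiv i r)).map
      (fun j => PySem.List.pyGetD (PySem.List.pyGetD c i []) j 0))
      = (PySem.List.pyRange ((n:Int) * r) (((n:Int) + 1) * r) 1).map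
          (fun j => PySem.List.pyGetD (PySem.List.pyGetD c i []) j 0) := by
    rw [hti i hi, filter_pyRange_block _ r (n:Int) hr hn0 hub]
  by_cases hg : pcnt ((PySem.List.pyRange 0 (c.length : Int) 1).map
      (fun j => PySem.List.pyGetD (PySem.List.pyGetD c i []) j 0)) ≠ 0
  · rw [if_pos hg, if_pos hg, if_pos hg, if_pos hg]
    have hps : psum (PySem.List.slice (PySem.List.pyGetD c i [])
          (some (Int.tdiv i r * r)) (some ((Int.tdiv i r + 1) * r)))
        = psum ((PySem.List.pyRange ((n:Int) * r) (((n:Int) + 1) * r) 1).map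
            (fun j => PySem.List.pyGetD (PySem.List.pyGetD c i []) j 0)) := by
      rw [hslice]
      exact (psum_eq_of_filter_eq _ _ (vals_block_filter _ _ _ h0 h1)).symm
    have hpc : pcnt (PySem.List.slice (PySem.List.pyGetD c i [])
          (some (Int.tdiv i r * r)) (some ((Int.tdiv i r + 1) * r)))
        = pcnt ((PySem.List.pyRange ((n:Int) * r) (((n:Int) + 1) * r) 1).map
            (fun j => PySem.List.pyGetD (PySem.List.pyGetD c i []) j 0)) := by
      rw [hslice]
      exact (pcnt_eq_of_filter_eq _ _ (vals_block_filter _ _ _ h0 h1)).symm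
    rw [hps, hpc, psum_filter_not, pcnt_filter_not, hvin]
  · push_neg at hg
    have hg' : ¬ (pcnt ((PySem.List.pyRange 0 (c.length : Int) 1).map
        (fun j => PySem.List.pyGetD (PySem.List.pyGetD c i []) j 0)) ≠ 0) := by
      simp [hg]
    rw [if_neg hg', if_neg hg', if_neg hg', if_neg hg']
    have z1 := psum_zero_of_sublist
      (((PySem.List.pyRange 0 (c.length : Int) 1).filter
          (fun j => Int.tdiv j r == Int.tdiv i r)).map
        (fun j => PySem.List.pyGetD (PySem.List.pyGetD c i []) j 0))
      ((PySem.List.pyRange 0 (c.length : Int) 1).map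
        (fun j => PySem.List.pyGetD (PySem.List.pyGetD c i []) j 0))
      (List.filter_sublist.map _) hg
    have z2 := psum_zero_of_sublist
      (((PySem.List.pyRange 0 (c.length : Int) 1).filter
          (fun j => !(Int.tdiv j r == Int.tdiv i r))).map
        (fun j => PySem.List.pyGetD (PySem.List.pyGetD c i []) j 0))
      ((PySem.List.pyRange 0 (c.length : Int) 1).map
        (fun j => PySem.List.pyGetD (PySem.List.pyGetD c i []) j 0))
      (List.filter_sublist.map _) hg
    have z3 := pcnt_zero_of_sublist
      (((PySem.List.pyRange 0 (c.length : Int) 1).filter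
          (fun j => Int.tdiv j r == Int.tdiv i r)).map
        (fun j => PySem.List.pyGetD (PySem.List.pyGetD c i []) j 0))
      ((PySem.List.pyRange 0 (c.length : Int) 1).map
        (fun j => PySem.List.pyGetD (PySem.List.pyGetD c i []) j 0))
      (List.filter_sublist.map _) hg
    have z4 := pcnt_zero_of_sublist
      (((PySem.List.pyRange 0 (c.length : Int) 1).filter
          (fun j => !(Int.tdiv j r == Int.tdiv i r))).map
        (fun j => PySem.List.pyGetD (PySem.List.pyGetD c i []) j 0))
      ((PySem.List.pyRange 0 (c.length : Int) 1).map
        (fun j => PySem.List.pyGetD (PySem.List.pyGetD c i []) j 0))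
      (List.filter_sublist.map _) hg
    rw [z1, z2, z3, z4]

theorem stepB_eq_modify (c : List (List Int)) (r : Int) (nc : List (List Int)) (i : Int)
    (hi : 0 ≤ Int.tdiv i r) :
    stepB c r nc i = nc.modify (Int.tdiv i r).toNat (recActB c r i) := by
  by_cases hg : ((PySem.List.pyRange 0 (c.length : Int) 1).foldl
      (fun (acc : Int × Int) j =>
        if 0 < PySem.List.pyGetD (PySem.List.pyGetD c i []) j 0 then
          (acc.1 + PySem.List.pyGetD (PySem.List.pyGetD c i []) j 0, acc.2 + 1) else acc)
      (0, 0)).2 ≠ 0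
  · rw [← set_getD_eq_modify nc (Int.tdiv i r).toNat [] (recActB c r i)]
    simp only [stepB, recActB]
    rw [PySem.List.pySetD_of_nonneg nc _ hi, PySem.List.pyGetD_of_nonneg nc [] hi,
        if_pos hg, if_pos hg]
  · have hrec : recActB c r i = fun rec => rec := by
      funext rec
      simp only [recActB]
      rw [if_neg hg]
    rw [hrec, modify_pointwise_id nc _ _ (fun x => rfl)]
    simp only [stepB]
    rw [if_neg hg]

theorem stepB_nil (c : List (List Int)) (r i : Int) : stepB c r [] i = [] := by
  simp only [stepB]
  by_cases hg : ((PySem.List.pyRange 0 (c.length : Int) 1).foldl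
      (fun (acc : Int × Int) j =>
        if 0 < PySem.List.pyGetD (PySem.List.pyGetD c i []) j 0 then
          (acc.1 + PySem.List.pyGetD (PySem.List.pyGetD c i []) j 0, acc.2 + 1) else acc)
      (0, 0)).2 ≠ 0
  · rw [if_pos hg]
    exact List.eq_nil_of_length_eq_zero (by simp [PySem.List.length_pySetD])
  · rw [if_neg hg]

theorem ports_eq (c : List (List Int)) (r : Int) :
    calc_node_com c r = calc_node_com_alt c r := by
  rw [calc_node_com_eq, calc_node_com_alt_eq]
  by_cases hpos : 0 < Int.tdiv (c.length : Int) r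
  case neg =>
    have hnil : PySem.List.pyRange 0 (Int.tdiv (c.length : Int) r) 1 = [] :=
      PySem.List.pyRange_one_eq_nil (by omega)
    rw [hnil]
    simp only [List.foldl_nil, List.map_nil]
    rw [foldl_fixed _ _ _ (fun i => stepB_nil c r i)]
    apply foldl_fixed
    intro i
    exact foldl_fixed _ _ _ (fun j => stepA_nil c r i j)
  case pos =>
    have hR0 : (0:Int) ≤ (c.length : Int) := by positivity
    have hr : 0 < r := by
      by_contra h
      push_neg at h
      have := nodes_nonpos_of_r_nonpos (c.length : Int) r hR0 h
      omega
    have hNr : Int.tdiv (c.length : Int) r * r ≤ (c.length : Int) := by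
      rw [tdiv_nonneg_eq_ediv _ r hR0]
      exact Int.ediv_mul_le _ (by omega)
    have hinitA : (PySem.List.pyRange 0 (Int.tdiv (c.length : Int) r) 1).foldl
        (fun nc _ => nc ++ [[0, 0, 0, 0]]) ([] : List (List Int))
        = (PySem.List.pyRange 0 (Int.tdiv (c.length : Int) r) 1).map
            (fun _ => [0, 0, 0, 0]) := by
      simpa using PySem.List.foldl_append_singleton_eq_map
        (fun _ : Int => ([0, 0, 0, 0] : List Int))
        (PySem.List.pyRange 0 (Int.tdiv (c.length : Int) r) 1) []
    rw [hinitA]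
    have hnonneg : ∀ i ∈ PySem.List.pyRange 0 (c.length : Int) 1, 0 ≤ Int.tdiv i r := by
      intro i hi
      have hi0 : 0 ≤ i := ((PySem.List.mem_pyRange_one).1 hi).1
      rw [tdiv_nonneg_eq_ediv i r hi0]
      exact Int.ediv_nonneg hi0 hr.le
    have houter : ∀ (nc : List (List Int)), ∀ i ∈ PySem.List.pyRange 0 (c.length : Int) 1,
        (PySem.List.pyRange 0 (c.length : Int) 1).foldl (fun nc j => stepA c r nc i j) nc
          = nc.modify (Int.tdiv i r).toNat
              (fun row => (PySem.List.pyRange 0 (c.length : Int) 1).foldl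
                (fun row j => rowAct c r i j row) row) := by
      intro nc i hi
      have hfn : (fun (nc : List (List Int)) (j : Int) => stepA c r nc i j)
          = fun nc j => nc.modify (Int.tdiv i r).toNat (rowAct c r i j) := by
        funext nc j
        exact stepA_eq_modify c r nc i j (hnonneg i hi)
      rw [hfn, inner_fold_modify]
    have houterB : ∀ (nc : List (List Int)), ∀ i ∈ PySem.List.pyRange 0 (c.length : Int) 1,
        stepB c r nc i = nc.modify (Int.tdiv i r).toNat (recActB c r i) := by
      intro nc i hi
      exact stepB_eq_modify c r nc i (hnonneg i hi)
    rw [PySem.List.foldl_congr_mem _ (fun nc i => stepB c r nc i)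
      (fun nc i => nc.modify (Int.tdiv i r).toNat (recActB c r i)) _ houterB]
    rw [PySem.List.foldl_congr_mem _ _
      (fun nc i => nc.modify (Int.tdiv i r).toNat
        (fun row => (PySem.List.pyRange 0 (c.length : Int) 1).foldl
          (fun row j => rowAct c r i j row) row)) _ houter]
    apply List.ext_getElem?
    intro m
    rw [outer_fold_getElem?_proof _ (fun i => (Int.tdiv i r).toNat)
      (fun i row => (PySem.List.pyRange 0 (c.length : Int) 1).foldl
        (fun row j => rowAct c r i j row) row)]
    rw [outer_fold_getElem?_proof _ (fun i => (Int.tdiv i r).toNat) (fun i => recActB c r i)]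
    have hNc : (((Int.tdiv (c.length : Int) r).toNat : Int)) = Int.tdiv (c.length : Int) r :=
      Int.toNat_of_nonneg hpos.le
    by_cases hm : m < (Int.tdiv (c.length : Int) r).toNat
    · have hgetI : ((PySem.List.pyRange 0 (Int.tdiv (c.length : Int) r) 1).map
          (fun _ => ([0, 0, 0, 0] : List Int)))[m]? = some [0, 0, 0, 0] := by
        rw [← hNc]
        exact PySem.List.getElem?_map_pyRange_zero _ _ m hm
      rw [hgetI]
      have hub : ((m : Int) + 1) * r ≤ (c.length : Int) := by
        have hm1 : ((m : Int) + 1) ≤ Int.tdiv (c.length : Int) r := by omega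
        calc ((m : Int) + 1) * r ≤ Int.tdiv (c.length : Int) r * r :=
              mul_le_mul_of_nonneg_right hm1 hr.le
          _ ≤ (c.length : Int) := hNr
      exact congrArg _ (block_eq c r hr m hub)
    · have hlen : ∀ {β : Type} (f : Int → β),
          ((PySem.List.pyRange 0 (Int.tdiv (c.length : Int) r) 1).map f)[m]? = none := by
        intro β f
        apply List.getElem?_eq_none
        simp only [List.length_map, PySem.List.length_pyRange_one]
        omega
      rw [hlen]
      rfl

-- ===== VERDICT (by name: the statement is the Claim_ definition above) =====
theorem calc_node_com_spec : Claim_equal_calc_node_com := by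
  intro comTab ranksPerNode _ _
  exact ports_eq comTab ranksPerNode
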